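-- pv_equiv track=rewrite | github.com/sunz8281/coding-test | programmers/Python3/250137/［PCCP 기출문제］ 1번 ／ 붕대 감기.py | solution
-- ===== SOURCE A (Python) =====
-- def solution(bandage, health, attacks):
--     t, x, y = bandage
--     l_t = 0
--     current = health
--     for attack in attacks:
--         a_t, a_p = attack
--         cnt = a_t - l_t - 1
--         current = min(current + cnt*x + (cnt//t)*y, health) - a_p
--         l_t = a_t
--         if current<=0: return -1
--     return current
-- ===== SOURCE B (Python) =====
-- def solution(bandage, health, attacks):
--     # Staged array pipeline instead of a clamped-accumulator loop: build gap/heal/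
--     # delta lists, prefix sums, a running max of overfill "peaks"; the clamped
--     # health after attack k is health + prefix[k+1] - best[k+1].
--     t, x, y = bandage
--     times = [a for a, _ in attacks]
--     gaps = [a - p - 1 for p, a in zip([0] + times, times)]
--     heals = [g * x + (g // t) * y for g in gaps]
--     deltas = [h - d for h, (_, d) in zip(heals, attacks)]
--     prefix = [0]
--     for d in deltas:
--         prefix.append(prefix[-1] + d)
--     peaks = [pr + h for pr, h in zip(prefix, heals)]
--     best = [0]
--     for pk in peaks:
--         best.append(max(best[-1], pk))
--     cur = [health + s - b for s, b in zip(prefix[1:], best[1:])]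
--     if any(c <= 0 for c in cur):
--         return -1
--     return cur[-1] if cur else health
-- ===== Notes on version B (the rewrite author's own statement) =====
-- stated objective: alternative
-- what changed: B replaces A's early-returning clamped-accumulator loop by a staged array pipeline: gap/heal/delta lists, prefix sums and a running maximum of overfill peaks, with clamped health after attack k recovered as health + prefix[k+1] - best[k+1].
import Mathlib
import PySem

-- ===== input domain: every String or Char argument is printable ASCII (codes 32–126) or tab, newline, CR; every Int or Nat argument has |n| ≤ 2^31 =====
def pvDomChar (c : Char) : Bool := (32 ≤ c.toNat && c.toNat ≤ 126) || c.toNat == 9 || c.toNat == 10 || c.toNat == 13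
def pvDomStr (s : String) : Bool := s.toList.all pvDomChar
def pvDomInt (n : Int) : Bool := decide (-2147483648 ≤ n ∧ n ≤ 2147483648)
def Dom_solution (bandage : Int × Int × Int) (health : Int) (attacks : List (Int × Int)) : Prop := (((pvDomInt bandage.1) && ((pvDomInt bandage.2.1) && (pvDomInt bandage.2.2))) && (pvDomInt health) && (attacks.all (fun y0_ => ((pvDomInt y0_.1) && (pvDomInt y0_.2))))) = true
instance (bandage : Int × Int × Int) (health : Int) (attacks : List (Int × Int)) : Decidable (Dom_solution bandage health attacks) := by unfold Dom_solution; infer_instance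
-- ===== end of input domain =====

-- B replaces A's early-returning clamped-accumulator loop by a staged array pipeline
-- (gap/heal/delta lists, pref sums, running max of overfill peaks): an alternative
-- decomposition of the same O(n) cost.


-- ===== PORT A =====
-- A's loop over attacks: state (l_t, current); early return -1.
def solLoop (t x y health : Int) : List (Int × Int) → Int → Int → Int
  | [], _, current => current
  | (a_t, a_p) :: rest, l_t, current =>
    let cnt := a_t - l_t - 1
    let current' := min (current + cnt * x + PySem.Int.floordiv cnt t * y) health - a_p
    if current' ≤ 0 then -1 else solLoop t x y health rest a_t current'

def solution (bandage : Int × Int × Int) (health : Int) (attacks : List (Int × Int)) : Int :=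
  solLoop bandage.1 bandage.2.1 bandage.2.2 health attacks 0 health

-- ===== PORT B =====
-- B's helpers: the two hand-written running-scan loops (pref sums / running max).
def scanAdd : Int → List Int → List Int
  | s, [] => [s]
  | s, d :: ds => s :: scanAdd (s + d) ds

def scanMax : Int → List Int → List Int
  | b, [] => [b]
  | b, p :: ps => b :: scanMax (max b p) ps

def solution_alt (bandage : Int × Int × Int) (health : Int) (attacks : List (Int × Int)) : Int :=
  let t := bandage.1
  let x := bandage.2.1
  let y := bandage.2.2
  let times := attacks.map Prod.fst
  let gaps := List.zipWith (fun p a => a - p - 1) (0 :: times) times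
  let heals := gaps.map (fun g => g * x + PySem.Int.floordiv g t * y)
  let deltas := List.zipWith (fun h ad => h - ad.2) heals attacks
  let pref := scanAdd 0 deltas
  let peaks := List.zipWith (fun pr h => pr + h) pref heals
  let best := scanMax 0 peaks
  let cur := List.zipWith (fun s b => health + s - b) pref.tail best.tail
  if cur.any (fun c => decide (c ≤ 0)) then -1
  else cur.getLastD health

-- ===== PRECONDITION & SPEC =====
-- Pre_ excludes only t = 0 with a nonempty attack list, where Python A raises
-- ZeroDivisionError on 'cnt // t' (B raises there too); A is total everywhere else.
def Pre_solution (bandage : Int × Int × Int) (health : Int) (attacks : List (Int × Int)) : Prop :=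
  bandage.1 ≠ 0 ∨ attacks = []
instance (bandage : Int × Int × Int) (health : Int) (attacks : List (Int × Int)) : Decidable (Pre_solution bandage health attacks) := by unfold Pre_solution; infer_instance

def pvWitness_solution : (Int × Int × Int) × Int × (List (Int × Int)) := ((5, 1, 1), 30, [(2, 10), (9, 15), (10, 5)])

def Spec_solution (bandage : Int × Int × Int) (health : Int) (attacks : List (Int × Int)) (out : Int) : Prop := out = solution_alt bandage health attacks
instance (bandage : Int × Int × Int) (health : Int) (attacks : List (Int × Int)) (out : Int) : Decidable (Spec_solution bandage health attacks out) := by unfold Spec_solution; infer_instance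

-- ===== CLAIM (what is proved, stated in full; the proofs are below) =====
def Claim_equal_solution : Prop := ∀ (bandage : Int × Int × Int) (health : Int) (attacks : List (Int × Int)), Dom_solution bandage health attacks → Pre_solution bandage health attacks → Spec_solution bandage health attacks (solution bandage health attacks)

-- ===== LEMMAS AND PROOFS =====

-- The pipeline invariant, generalized over the previous attack time l, the starting
-- pref value s and starting running maximum b: A's clamped current health equals
-- health + s - b.
lemma curZip (f : Int → Int → Int) (s b : Int) (l1 l2 : List Int) :
    List.zipWith f (scanAdd s l1) (scanMax b l2)
      = f s b :: List.zipWith f (scanAdd s l1).tail (scanMax b l2).tail := by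
  cases l1 <;> cases l2 <;> rfl

lemma key (t x y health : Int) :
    ∀ (atks : List (Int × Int)) (l s b : Int),
      solLoop t x y health atks l (health + s - b) =
        (let times := atks.map Prod.fst
         let gaps := List.zipWith (fun p a => a - p - 1) (l :: times) times
         let heals := gaps.map (fun g => g * x + PySem.Int.floordiv g t * y)
         let deltas := List.zipWith (fun h ad => h - ad.2) heals atks
         let pref := scanAdd s deltas
         let peaks := List.zipWith (fun pr h => pr + h) pref heals
         let best := scanMax b peaks
         let cur := List.zipWith (fun s' b' => health + s' - b') pref.tail best.tail
         if cur.any (fun c => decide (c ≤ 0)) then -1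
         else cur.getLastD (health + s - b)) := by
  intro atks
  induction atks with
  | nil => intro l s b; rfl
  | cons hd rest ih =>
    intro l s b
    obtain ⟨a_t, a_p⟩ := hd
    simp only [List.map_cons, List.zipWith_cons_cons, scanAdd, scanMax, solLoop, List.tail_cons]
    set g := (a_t - l - 1) * x + PySem.Int.floordiv (a_t - l - 1) t * y with hg
    set s' := s + (g - a_p) with hs'
    set b' := max b (s + g) with hb'
    have hcur : min (health + s - b + (a_t - l - 1) * x + PySem.Int.floordiv (a_t - l - 1) t * y) health - a_p
        = health + s' - b' := by
      rcases le_total b (s + g) with h | h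
      · rw [hb', max_eq_right h]; omega
      · rw [hb', max_eq_left h]; omega
    rw [hcur, curZip]
    simp only [List.any_cons, List.getLastD_cons]
    by_cases hle : health + s' - b' ≤ 0
    · simp [hle]
    · rw [if_neg hle]
      have hthis := ih a_t s' b'
      simp only [] at hthis
      rw [hthis]
      have hdec : (decide (health + s' - b' ≤ 0)) = false := by simpa using hle
      rw [hdec, Bool.false_or]

-- ===== VERDICT (by name: the statement is the Claim_ definition above) =====
theorem solution_spec : Claim_equal_solution := by
  intro bandage health attacks _ _
  unfold Spec_solution solution solution_alt
  have h := key bandage.1 bandage.2.1 bandage.2.2 health attacks 0 0 0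
  simpa using h
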